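-- pv_equiv track=rewrite | github.com/quandole-oss/Week-3-Project-LegacyLens- | backend/app/ingestion/chunker.py | _extract_preceding_comments
-- ===== SOURCE A (Python) =====
-- def _extract_preceding_comments(lines: list[str], routine_start: int) -> int:
--     """Walk backwards from routine_start to find the beginning of the comment block."""
--     idx = routine_start - 1
--     while idx >= 0:
--         line = lines[idx].strip()
--         # LAPACK comment lines start with '*' or 'C' or '!' in column 1
--         if line and (line[0] in ('*', 'C', 'c', '!')):
--             idx -= 1
--         elif line == '':
--             idx -= 1
--         else:
--             break
--     return idx + 1
-- ===== SOURCE B (Python) =====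
-- def _extract_preceding_comments(lines: list[str], routine_start: int) -> int:
--     """Forward single pass: track the length of the current run of comment/blank
--     lines; the block start is routine_start minus the length of the final run."""
--     run = 0
--     for i in range(routine_start):
--         line = lines[i].strip()
--         if not line or line[0] in ('*', 'C', 'c', '!'):
--             run += 1
--         else:
--             run = 0
--     return routine_start - run
-- ===== Notes on version B (the rewrite author's own statement) =====
-- stated objective: alternative
-- what changed: Replaces the backward walk-and-break loop with a single forward pass over lines[:routine_start] that counts the length of the trailing run of comment/blank lines and returns routine_start minus that run.
import Mathlib
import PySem

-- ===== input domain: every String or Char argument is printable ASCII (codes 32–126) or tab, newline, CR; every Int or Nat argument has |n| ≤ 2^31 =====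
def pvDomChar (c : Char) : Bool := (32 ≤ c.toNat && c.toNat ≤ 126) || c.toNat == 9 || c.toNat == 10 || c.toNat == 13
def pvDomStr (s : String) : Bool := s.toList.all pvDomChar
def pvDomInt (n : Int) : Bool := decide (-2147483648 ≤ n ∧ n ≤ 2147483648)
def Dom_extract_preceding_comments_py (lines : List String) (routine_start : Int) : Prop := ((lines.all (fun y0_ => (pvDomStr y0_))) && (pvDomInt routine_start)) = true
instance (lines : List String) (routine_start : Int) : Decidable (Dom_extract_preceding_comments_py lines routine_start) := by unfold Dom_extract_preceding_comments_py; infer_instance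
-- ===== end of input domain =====

-- B replaces A's backward walk-and-break with a forward single pass that counts the trailing
-- run of comment/blank lines and returns routine_start minus that run (alternative decomposition).

-- ===== PORT A =====
-- the `while idx >= 0` loop of A, step for step; `lines[idx]` via pyGet? (none = IndexError,
-- excluded by Pre_, defaulted to "" there)
def pvALoop (lines : List String) (idx : Int) : Int :=
  if h : 0 ≤ idx then
    let line := PySem.Str.strip ((PySem.List.pyGet? lines idx).getD "")
    if line ≠ "" ∧ (PySem.Str.pyGet? line 0).getD ' ' ∈ (['*', 'C', 'c', '!'] : List Char) then
      pvALoop lines (idx - 1)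
    else if line = "" then
      pvALoop lines (idx - 1)
    else
      idx + 1
  else
    idx + 1
termination_by (idx + 1).toNat
decreasing_by all_goals omega

def extract_preceding_comments_py (lines : List String) (routine_start : Int) : Int :=
  pvALoop lines (routine_start - 1)

-- ===== PORT B =====
def extract_preceding_comments_py_alt (lines : List String) (routine_start : Int) : Int :=
  routine_start -
    (PySem.List.pyRange 0 routine_start 1).foldl
      (fun run i =>
        let line := PySem.Str.strip ((PySem.List.pyGet? lines i).getD "")
        if line = "" ∨ (PySem.Str.pyGet? line 0).getD ' ' ∈ (['*', 'C', 'c', '!'] : List Char) then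
          run + 1
        else
          0)
      0

-- ===== PRECONDITION & SPEC =====
-- A raises IndexError exactly when routine_start > len(lines) (it reads lines[routine_start-1]);
-- those inputs are excluded, nothing else is.
def Pre_extract_preceding_comments_py (lines : List String) (routine_start : Int) : Prop :=
  routine_start ≤ (lines.length : Int)
instance (lines : List String) (routine_start : Int) : Decidable (Pre_extract_preceding_comments_py lines routine_start) := by unfold Pre_extract_preceding_comments_py; infer_instance

def pvWitness_extract_preceding_comments_py : List String × Int := (["* comment"], 1)

def Spec_extract_preceding_comments_py (lines : List String) (routine_start : Int) (out : Int) : Prop := out = extract_preceding_comments_py_alt lines routine_start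
instance (lines : List String) (routine_start : Int) (out : Int) : Decidable (Spec_extract_preceding_comments_py lines routine_start out) := by unfold Spec_extract_preceding_comments_py; infer_instance

-- ===== CLAIM (what is proved, stated in full; the proofs are below) =====
def Claim_equal_extract_preceding_comments_py : Prop := ∀ (lines : List String) (routine_start : Int), Dom_extract_preceding_comments_py lines routine_start → Pre_extract_preceding_comments_py lines routine_start → Spec_extract_preceding_comments_py lines routine_start (extract_preceding_comments_py lines routine_start)

-- ===== LEMMAS AND PROOFS =====

-- B's fold step, named for the proofs
def pvBStep (lines : List String) (run i : Int) : Int :=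
  let line := PySem.Str.strip ((PySem.List.pyGet? lines i).getD "")
  if line = "" ∨ (PySem.Str.pyGet? line 0).getD ' ' ∈ (['*', 'C', 'c', '!'] : List Char) then
    run + 1
  else
    0

lemma pvAlt_eq_foldl (lines : List String) (r : Int) :
    extract_preceding_comments_py_alt lines r =
      r - (PySem.List.pyRange 0 r 1).foldl (pvBStep lines) 0 := rfl

-- core: backward loop from n-1 = n minus the trailing skip-run counted forward over [0, n)
lemma pvLoop_eq_fold (lines : List String) :
    ∀ (n : Nat), (n : Int) ≤ lines.length →
      pvALoop lines ((n : Int) - 1) =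
        (n : Int) - (PySem.List.pyRange 0 (n : Int) 1).foldl (pvBStep lines) 0 := by
  intro n
  induction n with
  | zero =>
    intro _
    rw [pvALoop]
    simp [PySem.List.pyRange_one_eq_nil]
  | succ n ih =>
    intro hle
    have hn : (n : Int) ≤ lines.length := by push_cast at hle ⊢; omega
    have hrange : PySem.List.pyRange 0 ((n : Nat) + 1 : Int) 1
        = PySem.List.pyRange 0 (n : Int) 1 ++ [(n : Int)] := by
      exact PySem.List.pyRange_one_succ_right (by positivity)
    have hidx : ((n + 1 : Nat) : Int) - 1 = (n : Int) := by push_cast; ring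
    rw [pvALoop, hidx]
    have h0 : (0 : Int) ≤ (n : Int) := by positivity
    rw [dif_pos h0]
    push_cast
    rw [hrange, List.foldl_append]
    simp only [List.foldl_cons, List.foldl_nil, pvBStep]
    have hrec := ih hn
    split_ifs with h1 h2 h3 h4 h5
    · -- comment line: both skip
      rw [hrec]; ring
    · -- comment line judged hard by B: impossible
      exact absurd (Or.inr h1.2) h2
    · -- blank line: both skip
      rw [hrec]; ring
    · exact absurd (Or.inl h3) h4
    · -- non-blank non-comment judged skip by B: impossible
      rcases h5 with h5 | h5
      · exact absurd h5 h3
      · exact absurd ⟨h3, h5⟩ h1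
    · ring

-- ===== VERDICT (by name: the statement is the Claim_ definition above) =====
theorem extract_preceding_comments_py_spec : Claim_equal_extract_preceding_comments_py := by
  intro lines r _hdom hpre
  unfold Pre_extract_preceding_comments_py at hpre
  unfold Spec_extract_preceding_comments_py extract_preceding_comments_py
  rw [pvAlt_eq_foldl]
  by_cases hr : r ≤ 0
  · -- empty range: fold is 0 and A's loop exits immediately returning r
    rw [PySem.List.pyRange_one_eq_nil hr]
    rw [pvALoop, dif_neg (by omega)]
    simp
  · rw [not_le] at hr
    have hn : r = ((r.toNat : Nat) : Int) := by omega
    rw [hn]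
    exact pvLoop_eq_fold lines r.toNat (by rw [← hn]; exact_mod_cast hpre)
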